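-- pv_equiv track=rewrite | github.com/mmauro07/ip | guia7.py | reemplazar_pos_pares_por_cero
-- ===== SOURCE A (Python) =====
-- def es_par(num:int) -> bool:
--     return num % 2 == 0
--
-- def reemplazar_pos_pares_por_cero(s:list [int]):
--     longitud:int = len(s)
--     i = 0
--     while (i < longitud):
--         if es_par(i):
--             s[i] = 0
--         i += 1
--     return s
-- ===== SOURCE B (Python) =====
-- def reemplazar_pos_pares_por_cero(s: list[int]):
--     s[::2] = [0] * ((len(s) + 1) // 2)
--     return s
-- ===== Notes on version B (the rewrite author's own statement) =====
-- stated objective: idiomatic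
-- what changed: Replaces the index-counting while loop with a parity test by a single extended-slice assignment of a zero list of length (len(s)+1)//2 onto the even-index stride, with no explicit loop or parity helper.
import Mathlib
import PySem

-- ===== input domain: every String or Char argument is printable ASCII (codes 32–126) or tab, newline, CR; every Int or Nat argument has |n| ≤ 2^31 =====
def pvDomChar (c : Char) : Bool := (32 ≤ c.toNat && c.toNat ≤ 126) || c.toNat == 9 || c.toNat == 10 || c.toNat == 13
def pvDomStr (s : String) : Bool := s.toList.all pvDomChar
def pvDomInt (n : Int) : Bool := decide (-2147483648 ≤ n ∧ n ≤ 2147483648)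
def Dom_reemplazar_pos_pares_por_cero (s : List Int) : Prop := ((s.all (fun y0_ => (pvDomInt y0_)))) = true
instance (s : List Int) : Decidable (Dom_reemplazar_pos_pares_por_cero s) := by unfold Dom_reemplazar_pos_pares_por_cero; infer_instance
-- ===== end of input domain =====

-- B replaces the index-counting while loop by a single strided-slice assignment
-- (idiomatic; same cost). Python A and B both mutate the argument list in place and
-- return it; the equivalence proved here is about the return value.

-- ===== PORT A =====
def es_par (num : Int) : Bool := PySem.Int.mod num 2 == 0

-- the while loop: i runs from 0; i is always a valid nonnegative index here,
-- so s[i] = 0 is exactly s.set i.toNat 0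
def pvLoopA (longitud : Int) (s : List Int) (i : Int) : List Int :=
  if i < longitud then
    pvLoopA longitud (if es_par i then s.set i.toNat 0 else s) (i + 1)
  else s
termination_by (longitud - i).toNat
decreasing_by omega

def reemplazar_pos_pares_por_cero (s : List Int) : List Int :=
  pvLoopA (s.length : Int) s 0

-- ===== PORT B =====
-- extended-slice assignment s[::2] = zs (len(zs) matches the stride count):
-- write the k-th element of zs at position 2k, keep odd positions
def pvSliceAssign2 : List Int → List Int → List Int
  | _ :: b :: t, z :: zs => z :: b :: pvSliceAssign2 t zs
  | _ :: [], z :: _ => [z]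
  | l, [] => l
  | [], _ => []

def reemplazar_pos_pares_por_cero_alt (s : List Int) : List Int :=
  pvSliceAssign2 s
    (List.replicate (PySem.Int.floordiv ((s.length : Int) + 1) 2).toNat 0)

-- ===== PRECONDITION & SPEC =====
def Spec_reemplazar_pos_pares_por_cero (s : List Int) (out : List Int) : Prop := out = reemplazar_pos_pares_por_cero_alt s
instance (s : List Int) (out : List Int) : Decidable (Spec_reemplazar_pos_pares_por_cero s out) := by unfold Spec_reemplazar_pos_pares_por_cero; infer_instance

-- ===== CLAIM (what is proved, stated in full; the proofs are below) =====
def Claim_equal_reemplazar_pos_pares_por_cero : Prop := ∀ (s : List Int), Dom_reemplazar_pos_pares_por_cero s → Spec_reemplazar_pos_pares_por_cero s (reemplazar_pos_pares_por_cero s)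

-- ===== LEMMAS AND PROOFS =====

-- reference function: zero out every position whose global parity is "even" (e = true)
def pvZeroEven (e : Bool) : List Int → List Int
  | [] => []
  | a :: t => (if e then 0 else a) :: pvZeroEven (!e) t

theorem es_par_nat (i : Nat) : es_par (i : Int) = (i % 2 == 0) := by
  simp [es_par]
  omega

theorem loopA_eq (n : Nat) (s : List Int) (i : Nat) (hn : n = s.length - i) :
    pvLoopA (s.length : Int) s i = s.take i ++ pvZeroEven (i % 2 == 0) (s.drop i) := by
  induction n generalizing s i with
  | zero =>
    rw [pvLoopA]
    have h : ¬ ((i : Int) < (s.length : Int)) := by omega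
    simp [h, List.drop_eq_nil_of_le (by omega : s.length ≤ i), pvZeroEven,
      List.take_of_length_le (by omega : s.length ≤ i)]
  | succ n ih =>
    have hi : i < s.length := by omega
    have hlt : (i : Int) < (s.length : Int) := by exact_mod_cast hi
    have hip : (i : Int) + 1 = ((i + 1 : Nat) : Int) := by push_cast; ring
    have hdrop : s.drop i = s[i] :: s.drop (i + 1) := List.drop_eq_getElem_cons hi
    rw [pvLoopA, if_pos hlt, es_par_nat]
    simp only [Int.toNat_natCast]
    by_cases he : i % 2 = 0
    · have hc : (i % 2 == 0) = true := by simp [he]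
      have h2 : ((i + 1) % 2 == 0) = false := by simp; omega
      simp only [hc, if_true]
      have hL : ((s.length : Nat) : Int) = (((s.set i 0).length : Nat) : Int) := by simp
      rw [hip, hL, ih (s.set i 0) (i + 1) (by simp; omega)]
      rw [List.set_eq_take_append_cons_drop, if_pos hi, hdrop]
      have htk : (s.take i).length = i := by simp [hi.le]
      have h1 : (s.take i ++ 0 :: s.drop (i + 1)).take (i + 1) = s.take i ++ [0] := by
        rw [show i + 1 = (s.take i).length + 1 from by rw [htk], List.take_append]
        simp
      have h3 : (s.take i ++ 0 :: s.drop (i + 1)).drop (i + 1) = s.drop (i + 1) := by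
        rw [show i + 1 = (s.take i).length + 1 from by rw [htk], List.drop_append]
        simp
      rw [h1, h3, h2]
      simp only [pvZeroEven, if_pos trivial, List.append_assoc, List.singleton_append,
        Bool.not_true]
    · have hc : (i % 2 == 0) = false := by simp [he]
      have h2 : ((i + 1) % 2 == 0) = true := by simp; omega
      simp only [hc, Bool.false_eq_true, if_false]
      rw [hip, ih s (i + 1) (by omega)]
      have ht : s.take (i + 1) = s.take i ++ [s[i]] := by
        rw [List.take_add_one]; simp [List.getElem?_eq_getElem hi]
      rw [hdrop, ht, h2]
      simp only [pvZeroEven, List.append_assoc, List.singleton_append]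
      simp

theorem int_half_toNat (m : Nat) :
    (PySem.Int.floordiv ((m : Int) + 1) 2).toNat = (m + 1) / 2 := by
  rw [PySem.Int.floordiv_eq_ediv_of_pos (by omega)]
  omega

theorem sliceAssign2_zero : ∀ s : List Int,
    pvSliceAssign2 s (List.replicate ((s.length + 1) / 2) 0) = pvZeroEven true s
  | [] => rfl
  | [a] => by simp [pvSliceAssign2, pvZeroEven]
  | a :: b :: t => by
    have ih := sliceAssign2_zero t
    have hk : (t.length + 1 + 1 + 1) / 2 = (t.length + 1) / 2 + 1 := by omega
    simp only [List.length_cons, hk, List.replicate_succ, pvSliceAssign2, pvZeroEven,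
      Bool.not_true, Bool.not_false, ih]
    simp

theorem sliceAssign2_eq (s : List Int) :
    pvSliceAssign2 s (List.replicate (PySem.Int.floordiv ((s.length : Int) + 1) 2).toNat 0)
      = pvZeroEven true s := by
  rw [int_half_toNat, sliceAssign2_zero]

-- ===== VERDICT (by name: the statement is the Claim_ definition above) =====
theorem reemplazar_pos_pares_por_cero_spec : Claim_equal_reemplazar_pos_pares_por_cero := by
  intro s _
  unfold Spec_reemplazar_pos_pares_por_cero reemplazar_pos_pares_por_cero
    reemplazar_pos_pares_por_cero_alt
  rw [sliceAssign2_eq]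
  have h := loopA_eq s.length s 0 (by omega)
  simpa using h
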